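-- pv_equiv track=rewrite | github.com/Cassie1111/Algorithms | binary_search.py | bs8
-- ===== SOURCE A (Python) =====
-- def bs8(arr, key):
--     l = 0
--     r = len(arr) - 1
--     while l <= r:
--         m = l + (r - l) // 2
--         if arr[m] < key:
--             l = m + 1
--         else:
--             r = m - 1
--
--     return r
-- ===== SOURCE B (Python) =====
-- def bs8(arr, key):
--     # Divide-and-conquer on list slices with an offset, instead of A's
--     # index-pair while loop.  Pivot (len-1)//2 matches A's midpoint exactly.
--     def go(sub, off):
--         if not sub:
--             return off - 1
--         p = (len(sub) - 1) // 2
--         if sub[p] < key: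
--             return go(sub[p + 1:], off + p + 1)
--         else:
--             return go(sub[:p], off)
--     return go(arr, 0)
-- ===== Notes on version B (the rewrite author's own statement) =====
-- stated objective: alternative
-- what changed: Replaces the mutable index-pair while loop by divide-and-conquer recursion on list slices carrying an offset (same pivot (len-1)//2 and comparisons, so the boundary index is identical even on unsorted input).
import Mathlib
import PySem

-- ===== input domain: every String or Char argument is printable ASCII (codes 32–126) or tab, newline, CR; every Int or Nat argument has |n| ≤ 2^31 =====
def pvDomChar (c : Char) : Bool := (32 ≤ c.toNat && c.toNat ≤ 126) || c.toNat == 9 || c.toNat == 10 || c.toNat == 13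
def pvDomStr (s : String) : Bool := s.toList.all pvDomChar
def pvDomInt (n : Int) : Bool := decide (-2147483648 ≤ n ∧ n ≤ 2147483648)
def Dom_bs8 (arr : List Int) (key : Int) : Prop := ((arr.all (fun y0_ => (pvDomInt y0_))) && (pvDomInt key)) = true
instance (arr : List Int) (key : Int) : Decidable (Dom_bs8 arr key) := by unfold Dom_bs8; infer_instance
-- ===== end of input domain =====

-- B replaces A's index-pair while loop by divide-and-conquer recursion on list
-- slices with an offset (same pivot, same comparisons, identical result).

-- ===== PORT A =====
-- while l <= r: … ;  return r.  Python's '//' agrees with Lean's '/' here since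
-- under the guard l ≤ r the numerator r - l is ≥ 0 and the divisor is 2 > 0.
-- arr[m] is always in range on reachable states (0 ≤ l ≤ m ≤ r < len), so
-- pyGetD's default is never used.
def bs8Loop (arr : List Int) (key : Int) (l r : Int) : Int :=
  if l ≤ r then
    let m := l + (r - l) / 2
    if PySem.List.pyGetD arr m 0 < key then bs8Loop arr key (m + 1) r
    else bs8Loop arr key l (m - 1)
  else r
termination_by (r + 1 - l).toNat
decreasing_by all_goals omega

def bs8 (arr : List Int) (key : Int) : Int :=
  bs8Loop arr key 0 ((arr.length : Int) - 1)

-- ===== PORT B =====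
-- go(sub, off): slices sub[p+1:] / sub[:p] are List.drop / List.take (bounds
-- are non-negative and ≤ len, where Python slicing is exactly drop/take);
-- sub[p] is always in range (0 ≤ p < len sub), so getD's default is never used.
def bs8Go (key : Int) (sub : List Int) (off : Int) : Int :=
  if sub.isEmpty then off - 1
  else
    let p := (sub.length - 1) / 2
    if sub.getD p 0 < key then bs8Go key (sub.drop (p + 1)) (off + (p : Int) + 1)
    else bs8Go key (sub.take p) off
termination_by sub.length
decreasing_by
  all_goals
    rename_i h _
    simp only [List.isEmpty_iff, ← List.length_eq_zero_iff] at h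
    simp only [List.length_drop, List.length_take]
    omega

def bs8_alt (arr : List Int) (key : Int) : Int := bs8Go key arr 0

-- ===== PRECONDITION & SPEC =====
def Spec_bs8 (arr : List Int) (key : Int) (out : Int) : Prop := out = bs8_alt arr key
instance (arr : List Int) (key : Int) (out : Int) : Decidable (Spec_bs8 arr key out) := by unfold Spec_bs8; infer_instance

-- ===== CLAIM (what is proved, stated in full; the proofs are below) =====
def Claim_equal_bs8 : Prop := ∀ (arr : List Int) (key : Int), Dom_bs8 arr key → Spec_bs8 arr key (bs8 arr key)

-- ===== LEMMAS AND PROOFS =====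

lemma loop_eq_go (arr : List Int) (key : Int) :
    ∀ (n : Nat) (l r : Int), (r + 1 - l).toNat = n → 0 ≤ l → l ≤ r + 1 →
      r < (arr.length : Int) →
      bs8Loop arr key l r = bs8Go key ((arr.drop l.toNat).take (r + 1 - l).toNat) l := by
  intro n
  induction n using Nat.strong_induction_on with
  | _ n ih =>
    intro l r hn hl hlr hr
    rw [bs8Loop, bs8Go]
    have hlenN : ((arr.drop l.toNat).take (r + 1 - l).toNat).length = (r + 1 - l).toNat := by
      simp only [List.length_take, List.length_drop]; omega
    by_cases hc : l ≤ r
    · -- one loop step vs one recursion step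
      have hNe : ¬ ((arr.drop l.toNat).take (r + 1 - l).toNat).isEmpty := by
        simp only [List.isEmpty_iff, ← List.length_eq_zero_iff, hlenN]; omega
      simp only [hc, if_pos, hNe, hlenN]
      set m : Int := l + (r - l) / 2 with hm
      have hmb : l ≤ m ∧ m ≤ r := by constructor <;> omega
      have hp : (((r + 1 - l).toNat - 1) / 2) = (m - l).toNat := by omega
      have hpi : ((((r + 1 - l).toNat - 1) / 2 : Nat) : Int) = m - l := by omega
      -- the probed element is the same on both sides
      have hget : ((arr.drop l.toNat).take (r + 1 - l).toNat).getD (((r + 1 - l).toNat - 1) / 2) 0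
          = PySem.List.pyGetD arr m 0 := by
        have hin : (m - l).toNat < (r + 1 - l).toNat := by omega
        rw [hp]
        rw [List.getD_eq_getElem?_getD, List.getElem?_take_of_lt hin, List.getElem?_drop]
        rw [PySem.List.pyGetD_eq_getElem (h0 := by omega) (h1 := by omega)]
        have : l.toNat + (m - l).toNat = m.toNat := by omega
        rw [this]
        rw [List.getElem?_eq_getElem (by omega)]
        rfl
      rw [hget]
      by_cases hlt : PySem.List.pyGetD arr m 0 < key
      · simp only [hlt, if_pos]
        rw [ih (r + 1 - (m + 1)).toNat (by omega) (m + 1) r rfl (by omega) (by omega) hr]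
        have h1 : (r + 1 - (m + 1)).toNat
            = (r + 1 - l).toNat - (((r + 1 - l).toNat - 1) / 2 + 1) := by omega
        have h2 : List.drop (m + 1).toNat arr
            = List.drop (l.toNat + (((r + 1 - l).toNat - 1) / 2 + 1)) arr := by
          rw [show (m + 1).toNat = l.toNat + (((r + 1 - l).toNat - 1) / 2 + 1) from by omega]
        have h3 : m + 1 = l + ((((r + 1 - l).toNat - 1) / 2 : Nat) : Int) + 1 := by omega
        rw [List.drop_take, List.drop_drop, ← h1, ← h2, ← h3]
        simp
      · simp only [hlt, if_neg, not_false_iff]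
        rw [ih ((m - 1) + 1 - l).toNat (by omega) l (m - 1) rfl hl (by omega) (by omega)]
        rw [List.take_take]
        rw [show min (((r + 1 - l).toNat - 1) / 2) (r + 1 - l).toNat = (m - 1 + 1 - l).toNat
          from by omega]
        simp
    · -- loop exits; here l = r + 1, the slice is empty and go returns off - 1 = r
      have hEmp : ((arr.drop l.toNat).take (r + 1 - l).toNat).isEmpty := by
        simp only [List.isEmpty_iff, ← List.length_eq_zero_iff, hlenN]; omega
      simp only [hc, if_neg, not_false_iff, hEmp, if_pos]
      omega

-- ===== VERDICT (by name: the statement is the Claim_ definition above) =====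
theorem bs8_spec : Claim_equal_bs8 := by
  intro arr key _
  unfold Spec_bs8 bs8 bs8_alt
  rcases arr with _ | ⟨a, as⟩
  · rw [bs8Loop, bs8Go]; simp
  · rw [loop_eq_go _ key ((((a :: as).length : Int) - 1) + 1 - 0).toNat 0
      (((a :: as).length : Int) - 1) rfl (by omega) (by omega) (by omega)]
    rw [show (((a :: as).length : Int) - 1 + 1 - 0).toNat = (a :: as).length from by omega,
      show (Int.toNat 0) = 0 from rfl, List.drop_zero, List.take_length]
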